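-- pv_equiv track=rewrite | github.com/tphaxx/LDraw-Pixelart-Generator | src/Common/image.py | calc_height_partition
-- ===== SOURCE A (Python) =====
-- def calc_height_partition(counts: int, height: int):
--     if (counts == 1) or (counts == 0):
--         return [height]
--     if height == 0:
--         return []
--
--     partitions = []
--     best_partition = None
--     count = min(counts, height)
--     best_max = 1e9
--
--     for divider in range(2, count + 1):
--         parts = height // divider
--         remain = height % divider
--         partition = [parts] * divider
--
--         if remain > 0:
--             if len(partition) < count:
--                 partition.append(remain)
--             else:
--                 partition[-1] += remain
--
--         partitions.append(partition)
--
--     for partition in partitions: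
--         part_max = max(partition)
--         if part_max < best_max:
--             best_max = part_max
--             best_partition = partition
--
--     return best_partition
-- ===== SOURCE B (Python) =====
-- def calc_height_partition(counts: int, height: int):
--     # O(count): compute each divider's maximum part in O(1), keep the best
--     # divider, and materialize only the winning partition.
--     if counts in (0, 1):
--         return [height]
--     if height == 0:
--         return []
--
--     count = min(counts, height)
--     best_d = None
--     best_max = None
--     for d in range(2, count + 1):
--         parts, remain = divmod(height, d)
--         if remain == 0:
--             m = parts
--         elif d < count:
--             m = parts if parts >= remain else remain
--         else:
--             m = parts + remain
--         if best_max is None or m < best_max: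
--             best_max = m
--             best_d = d
--     if best_d is None:
--         return None
--
--     parts, remain = divmod(height, best_d)
--     partition = [parts] * best_d
--     if remain:
--         if best_d < count:
--             partition.append(remain)
--         else:
--             partition[-1] += remain
--     return partition
-- ===== Notes on version B (the rewrite author's own statement) =====
-- stated objective: faster
-- what changed: Instead of materializing every candidate partition (O(count^2) work) and then scanning each list for its max, B computes each divider's maximum part in O(1) via divmod, tracks the best divider in a single pass, and builds only the winning partition once.
-- intended difference: For counts == 2 and height >= 1999999999 every candidate max reaches A's arbitrary 1e9 sentinel (best_max = 1e9), so A returns None; B returns the intended partition [height//2, height//2 + height%2], which is what the function exists to compute. — e.g. on calc_height_partition(2, 1999999999): A returns none, B returns some [999999999, 1000000000]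
import Mathlib
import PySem

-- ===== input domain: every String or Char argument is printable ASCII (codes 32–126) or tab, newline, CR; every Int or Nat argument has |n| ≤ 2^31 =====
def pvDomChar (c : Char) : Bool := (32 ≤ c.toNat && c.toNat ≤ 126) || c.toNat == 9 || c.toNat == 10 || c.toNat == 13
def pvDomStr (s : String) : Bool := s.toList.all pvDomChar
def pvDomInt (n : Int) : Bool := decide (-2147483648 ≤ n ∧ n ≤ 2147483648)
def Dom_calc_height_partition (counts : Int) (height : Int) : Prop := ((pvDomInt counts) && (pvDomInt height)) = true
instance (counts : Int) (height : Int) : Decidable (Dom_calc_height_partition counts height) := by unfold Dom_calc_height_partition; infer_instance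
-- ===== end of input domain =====

-- B replaces A's build-all-partitions-then-scan (O(count^2)) by a one-pass O(count)
-- search over dividers with O(1) maxima, building only the winning partition;
-- B drops A's 1e9 sentinel, so on counts = 2 with huge height it returns the
-- partition where A returns none (stated as the intended difference D_ below).

-- ===== PORT A =====
-- body of A's first loop: the partition built for one divider
def pvPartitionA (count height divider : Int) : List Int :=
  let parts := PySem.Int.floordiv height divider
  let remain := PySem.Int.mod height divider
  let partition := List.replicate divider.toNat parts          -- [parts] * divider (divider ≥ 2 here)
  if remain > 0 then
    if (partition.length : Int) < count then partition ++ [remain]              -- partition.append(remain)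
    else partition.dropLast ++ [partition.getLast?.getD 0 + remain]             -- partition[-1] += remain (list nonempty here)
  else partition

-- body of A's second loop: keep the partition with strictly smaller max
def pvSelectA (st : Int × Option (List Int)) (partition : List Int) : Int × Option (List Int) :=
  let part_max := (PySem.List.max? partition (fun x => x)).getD 0               -- max(partition); the list is never empty here
  if part_max < st.1 then (part_max, some partition) else st

def calc_height_partition (counts : Int) (height : Int) : Option (List Int) :=
  if counts = 1 ∨ counts = 0 then some [height]
  else if height = 0 then some []
  else
    let count := min counts height
    let partitions := (PySem.List.pyRange 2 (count + 1) 1).map (pvPartitionA count height)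
    -- best_max starts at the float 1e9; every part_max here is an integer of magnitude
    -- far below 2^53, so Python's int-vs-float comparison is exact: model it as 10^9
    (partitions.foldl pvSelectA (1000000000, none)).2

-- ===== PORT B =====
-- B's O(1) maximum part for one divider
def pvMaxB (count height d : Int) : Int :=
  let parts := PySem.Int.floordiv height d
  let remain := PySem.Int.mod height d
  if remain = 0 then parts
  else if d < count then (if parts ≥ remain then parts else remain)
  else parts + remain

-- B's loop body: track (best_max, best_d), first strict improvement wins
def pvStepB (count height : Int) (st : Option (Int × Int)) (d : Int) : Option (Int × Int) :=
  let m := pvMaxB count height d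
  match st with
  | none => some (m, d)
  | some (bm, bd) => if m < bm then some (m, d) else some (bm, bd)

-- B's final construction of the single winning partition
def pvBuildB (count height d : Int) : List Int :=
  let parts := PySem.Int.floordiv height d
  let remain := PySem.Int.mod height d
  let partition := List.replicate d.toNat parts
  if remain ≠ 0 then
    if d < count then partition ++ [remain]
    else partition.dropLast ++ [partition.getLast?.getD 0 + remain]
  else partition

def calc_height_partition_alt (counts : Int) (height : Int) : Option (List Int) :=
  if counts = 0 ∨ counts = 1 then some [height]
  else if height = 0 then some []
  else
    let count := min counts height
    match (PySem.List.pyRange 2 (count + 1) 1).foldl (pvStepB count height) none with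
    | none => none
    | some (_, bd) => some (pvBuildB count height bd)

-- ===== PRECONDITION & SPEC =====
-- For counts = 2 and height ≥ 1999999999 every candidate max reaches A's arbitrary
-- 1e9 sentinel, so A returns none; B returns the intended partition
-- [height//2, height//2 + height%2], which is what the function exists to compute.
def D_calc_height_partition (counts : Int) (height : Int) : Prop :=
  counts = 2 ∧ 1999999999 ≤ height
instance (counts : Int) (height : Int) : Decidable (D_calc_height_partition counts height) := by
  unfold D_calc_height_partition; infer_instance

def Spec_calc_height_partition (counts : Int) (height : Int) (out : Option (List Int)) : Prop :=
  ¬ D_calc_height_partition counts height → out = calc_height_partition_alt counts height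
instance (counts : Int) (height : Int) (out : Option (List Int)) : Decidable (Spec_calc_height_partition counts height out) := by
  unfold Spec_calc_height_partition; infer_instance

def pvDiffWitness_calc_height_partition : Int × Int := (2, 1999999999)
def pvDiffWitnessOut_calc_height_partition : (Option (List Int)) × (Option (List Int)) :=
  (none, some [999999999, 1000000000])

-- ===== CLAIM (what is proved, stated in full; the proofs are below) =====
def Claim_unchanged_calc_height_partition : Prop := ∀ (counts : Int) (height : Int), Dom_calc_height_partition counts height → Spec_calc_height_partition counts height (calc_height_partition counts height)
def Claim_changed_calc_height_partition : Prop := Dom_calc_height_partition (pvDiffWitness_calc_height_partition.1) (pvDiffWitness_calc_height_partition.2) ∧ D_calc_height_partition (pvDiffWitness_calc_height_partition.1) (pvDiffWitness_calc_height_partition.2) ∧ calc_height_partition (pvDiffWitness_calc_height_partition.1) (pvDiffWitness_calc_height_partition.2) = pvDiffWitnessOut_calc_height_partition.1 ∧ calc_height_partition_alt (pvDiffWitness_calc_height_partition.1) (pvDiffWitness_calc_height_partition.2) = pvDiffWitnessOut_calc_height_partition.2 ∧ pvDiffWitnessOut_calc_height_partition.1 ≠ pvDiffWitnessOut_calc_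height_partition.2
def Claim_exact_calc_height_partition : Prop := ∀ (counts : Int) (height : Int), Dom_calc_height_partition counts height → D_calc_height_partition counts height → calc_height_partition counts height ≠ calc_height_partition_alt counts height

-- ===== LEMMAS AND PROOFS =====

-- max(xs) (PySem.List.max?, identity key) applied to a list that contains v and is bounded by v
theorem pv_max_getD_eq {xs : List Int} {v : Int} (hv : v ∈ xs) (hmax : ∀ y ∈ xs, y ≤ v) :
    (PySem.List.max? xs (fun x => x)).getD 0 = v := by
  cases hx : PySem.List.max? xs (fun x => x) with
  | none =>
      rw [PySem.List.max?_eq_none_iff] at hx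
      subst hx; cases hv
  | some m =>
      have hm : m ∈ xs := PySem.List.max?_mem hx
      have h1 : v ≤ m := PySem.List.max?_isMax hx v hv
      have h2 : m ≤ v := hmax m hm
      simp [le_antisymm h2 h1]

theorem pv_mod_bounds (height d : Int) (hd : 2 ≤ d) :
    0 ≤ PySem.Int.mod height d ∧ PySem.Int.mod height d < d := by
  rw [PySem.Int.mod_eq_emod_of_pos (by omega)]
  exact ⟨Int.emod_nonneg _ (by omega), Int.emod_lt_of_pos _ (by omega)⟩

-- the max of A's partition for divider d is B's O(1) formula
theorem pv_part_max (count height d : Int) (hd : 2 ≤ d) :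
    (PySem.List.max? (pvPartitionA count height d) (fun x => x)).getD 0 = pvMaxB count height d := by
  obtain ⟨hr0, hrd⟩ := pv_mod_bounds height d hd
  simp only [pvPartitionA, pvMaxB]
  set parts := PySem.Int.floordiv height d with hparts
  set remain := PySem.Int.mod height d with hremain
  have hlen : ((List.replicate d.toNat parts).length : Int) = d := by
    simp [Int.toNat_of_nonneg (by omega : (0:Int) ≤ d)]
  have hdn : d.toNat = (d.toNat - 1) + 1 := by omega
  by_cases h0 : remain = 0
  · rw [if_neg (by omega : ¬ remain > 0), if_pos h0]
    exact pv_max_getD_eq (by simp; omega) (by intro y hy; simp [List.eq_of_mem_replicate hy])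
  · have hpos : remain > 0 := by omega
    rw [if_pos hpos, if_neg h0, hlen]
    by_cases hc : d < count
    · rw [if_pos hc, if_pos hc]
      by_cases hge : parts ≥ remain
      · rw [if_pos hge]
        refine pv_max_getD_eq (by simp; omega) ?_
        intro y hy
        rcases List.mem_append.mp hy with h | h
        · simp [List.eq_of_mem_replicate h]
        · simp at h; omega
      · rw [if_neg hge]
        refine pv_max_getD_eq (by simp) ?_
        intro y hy
        rcases List.mem_append.mp hy with h | h
        · have := List.eq_of_mem_replicate h; omega
        · simp at h; omega
    · rw [if_neg hc, if_neg hc]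
      rw [hdn, List.replicate_succ']
      rw [List.dropLast_concat, List.getLast?_concat]
      refine pv_max_getD_eq (by simp) ?_
      intro y hy
      rcases List.mem_append.mp hy with h | h
      · have := List.eq_of_mem_replicate h; omega
      · simp at h; omega

-- B rebuilds exactly the partition A built for that divider
theorem pv_build_eq (count height d : Int) (hd : 2 ≤ d) :
    pvBuildB count height d = pvPartitionA count height d := by
  obtain ⟨hr0, hrd⟩ := pv_mod_bounds height d hd
  by_cases h0 : PySem.Int.mod height d = 0
  · simp [pvBuildB, pvPartitionA, h0]
  · simp only [pvBuildB, pvPartitionA, List.length_replicate,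
      Int.toNat_of_nonneg (show (0:Int) ≤ d by omega)]
    rw [if_pos h0, if_pos (by omega : PySem.Int.mod height d > 0)]

-- the coupling invariant between A's fold state and B's fold state
def pvR (count height : Int) (a : Int × Option (List Int)) (b : Option (Int × Int)) : Prop :=
  match b with
  | none => a = (1000000000, none)
  | some (m, d) => 2 ≤ d ∧
      (if m < 1000000000 then a = (m, some (pvPartitionA count height d))
       else a = (1000000000, none))

theorem pv_step_R (count height d : Int) (hd : 2 ≤ d)
    (a : Int × Option (List Int)) (b : Option (Int × Int)) (h : pvR count height a b) :
    pvR count height (pvSelectA a (pvPartitionA count height d)) (pvStepB count height b d) := by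
  have hmax := pv_part_max count height d hd
  cases b with
  | none =>
      simp only [pvR] at h
      subst h
      simp only [pvStepB, pvR, pvSelectA, hmax]
      refine ⟨hd, ?_⟩
      by_cases hm : pvMaxB count height d < 1000000000
      · rw [if_pos hm, if_pos hm]
      · rw [if_neg hm, if_neg hm]
  | some md =>
      obtain ⟨m, bd⟩ := md
      simp only [pvR] at h
      obtain ⟨hbd, hif⟩ := h
      simp only [pvStepB, pvSelectA, hmax]
      by_cases hlt : pvMaxB count height d < m
      · rw [if_pos hlt]
        simp only [pvR]
        refine ⟨hd, ?_⟩
        by_cases hm : pvMaxB count height d < 1000000000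
        · rw [if_pos hm]
          by_cases hm' : m < 1000000000
          · rw [if_pos hm'] at hif; subst hif
            rw [if_pos hlt]
          · rw [if_neg hm'] at hif; subst hif
            rw [if_pos hm]
        · rw [if_neg hm]
          have hm' : ¬ m < 1000000000 := by omega
          rw [if_neg hm'] at hif; subst hif
          rw [if_neg (by omega : ¬ pvMaxB count height d < 1000000000)]
      · rw [if_neg hlt]
        simp only [pvR]
        refine ⟨hbd, ?_⟩
        by_cases hm' : m < 1000000000
        · rw [if_pos hm'] at hif ⊢; subst hif
          rw [if_neg (by simpa using hlt)]
        · rw [if_neg hm'] at hif ⊢; subst hif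
          rw [if_neg (by omega : ¬ pvMaxB count height d < 1000000000)]

theorem pv_fold_R (count height : Int) (L : List Int) (hL : ∀ d ∈ L, 2 ≤ d)
    (a : Int × Option (List Int)) (b : Option (Int × Int)) (h : pvR count height a b) :
    pvR count height
      (L.foldl (fun st d => pvSelectA st (pvPartitionA count height d)) a)
      (L.foldl (pvStepB count height) b) := by
  induction L generalizing a b with
  | nil => exact h
  | cons x L ih =>
      exact ih (fun d hd => hL d (List.mem_cons_of_mem _ hd)) _ _
        (pv_step_R count height x (hL x (List.mem_cons_self)) a b h)

-- B's running best max only decreases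
theorem pv_foldB_mono (count height : Int) (L : List Int) (m0 d0 m d : Int)
    (h : L.foldl (pvStepB count height) (some (m0, d0)) = some (m, d)) : m ≤ m0 := by
  induction L generalizing m0 d0 with
  | nil => simp at h; omega
  | cons x L ih =>
      simp only [List.foldl_cons, pvStepB] at h
      by_cases hlt : pvMaxB count height x < m0
      · rw [if_pos hlt] at h
        have := ih _ _ h; omega
      · rw [if_neg hlt] at h
        exact ih _ _ h

-- B's final best max is ≤ every candidate's max
theorem pv_foldB_le (count height : Int) (L : List Int) (b : Option (Int × Int)) (m d : Int)
    (h : L.foldl (pvStepB count height) b = some (m, d)) :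
    ∀ x ∈ L, m ≤ pvMaxB count height x := by
  induction L generalizing b with
  | nil => intro x hx; cases hx
  | cons y L ih =>
      intro x hx
      simp only [List.foldl_cons] at h
      rcases List.mem_cons.mp hx with rfl | hx'
      · -- the state right after processing x has best ≤ pvMaxB x; then it only decreases
        have hstep : ∃ m0 d0, pvStepB count height b x = some (m0, d0) ∧ m0 ≤ pvMaxB count height x := by
          cases b with
          | none => exact ⟨_, _, rfl, le_refl _⟩
          | some md =>
              obtain ⟨bm, bd⟩ := md
              simp only [pvStepB]
              by_cases hlt : pvMaxB count height x < bm
              · exact ⟨_, _, if_pos hlt, le_refl _⟩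
              · exact ⟨bm, bd, if_neg hlt, by omega⟩
        obtain ⟨m0, d0, hs, hle⟩ := hstep
        rw [hs] at h
        have := pv_foldB_mono count height L m0 d0 m d h
        omega
      · exact ih _ h x hx'

-- arithmetic: divider 3 always stays below the sentinel (inside the 2^31 domain)
theorem pv_mb3_lt (count height : Int) (h3 : 3 ≤ count) (hh : count ≤ height)
    (hb : height ≤ 2147483648) : pvMaxB count height 3 < 1000000000 := by
  simp only [pvMaxB]
  rw [PySem.Int.floordiv_eq_ediv_of_pos (by norm_num), PySem.Int.mod_eq_emod_of_pos (by norm_num)]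
  split_ifs <;> omega

-- arithmetic: divider 2 stays below the sentinel when height ≤ 1999999998
theorem pv_mb2_lt (count height : Int) (hc : count = 2) (hh : 2 ≤ height)
    (hb : height ≤ 1999999998) : pvMaxB count height 2 < 1000000000 := by
  simp only [pvMaxB]
  rw [PySem.Int.floordiv_eq_ediv_of_pos (by norm_num), PySem.Int.mod_eq_emod_of_pos (by norm_num)]
  split_ifs <;> omega

-- arithmetic: inside D_, the only divider 2 reaches the sentinel
theorem pv_mb2_ge (count height : Int) (hc : count = 2) (hh : 1999999999 ≤ height) :
    ¬ pvMaxB count height 2 < 1000000000 := by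
  simp only [pvMaxB]
  rw [PySem.Int.floordiv_eq_ediv_of_pos (by norm_num), PySem.Int.mod_eq_emod_of_pos (by norm_num)]
  split_ifs <;> omega

-- the two ports agree outside D_
theorem pv_main (counts height : Int) (hDom : Dom_calc_height_partition counts height)
    (hnD : ¬ D_calc_height_partition counts height) :
    calc_height_partition counts height = calc_height_partition_alt counts height := by
  have hbound : height ≤ 2147483648 := by
    unfold Dom_calc_height_partition pvDomInt at hDom
    simp only [Bool.and_eq_true, decide_eq_true_eq] at hDom
    omega
  unfold calc_height_partition calc_height_partition_alt
  by_cases h1 : counts = 1 ∨ counts = 0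
  · have h2 : counts = 0 ∨ counts = 1 := h1.symm
    rw [if_pos h1, if_pos h2]
  · have h2 : ¬ (counts = 0 ∨ counts = 1) := fun h => h1 h.symm
    rw [if_neg h1, if_neg h2]
    by_cases hh : height = 0
    · rw [if_pos hh, if_pos hh]
    · rw [if_neg hh, if_neg hh]
      simp only []
      set count := min counts height with hcount
      by_cases hc2 : count < 2
      · have hnil : PySem.List.pyRange 2 (count + 1) 1 = [] :=
          PySem.List.pyRange_one_eq_nil (by omega)
        rw [hnil]
        simp
      · replace hc2 : 2 ≤ count := by omega
        have hhh : 2 ≤ height := by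
          have := min_le_right counts height; omega
        have hcc : 2 ≤ counts := by
          have := min_le_left counts height; omega
        -- a divider whose max stays below the sentinel
        obtain ⟨ds, hds_mem, hds_lt⟩ :
            ∃ ds, ds ∈ PySem.List.pyRange 2 (count + 1) 1 ∧ pvMaxB count height ds < 1000000000 := by
          by_cases h3 : 3 ≤ count
          · refine ⟨3, PySem.List.mem_pyRange_one.mpr ⟨by norm_num, by omega⟩, ?_⟩
            exact pv_mb3_lt count height h3 (min_le_right counts height) hbound
          · have hc : count = 2 := by omega
            refine ⟨2, PySem.List.mem_pyRange_one.mpr ⟨le_refl _, by omega⟩, ?_⟩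
            by_cases hq : counts = 2
            · have hD : height ≤ 1999999998 := by
                unfold D_calc_height_partition at hnD
                by_contra hx
                exact hnD ⟨hq, by omega⟩
              exact pv_mb2_lt count height hc hhh hD
            · have hh2 : height = 2 := by omega
              exact pv_mb2_lt count height hc hhh (by omega)
        rw [List.foldl_map]
        have hL : ∀ d ∈ PySem.List.pyRange 2 (count + 1) 1, 2 ≤ d :=
          fun d hd => (PySem.List.mem_pyRange_one.mp hd).1
        have hR := pv_fold_R count height (PySem.List.pyRange 2 (count + 1) 1) hL
          (1000000000, none) none (by simp [pvR])
        cases hb : (PySem.List.pyRange 2 (count + 1) 1).foldl (pvStepB count height) none with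
        | none =>
            rw [hb] at hR
            simp only [pvR] at hR
            rw [hR]
        | some md =>
            obtain ⟨m, d⟩ := md
            rw [hb] at hR
            simp only [pvR] at hR
            obtain ⟨hd2, hif⟩ := hR
            have hle := pv_foldB_le count height _ none m d hb ds hds_mem
            have hm : m < 1000000000 := by omega
            rw [if_pos hm] at hif
            rw [hif]
            simp [pv_build_eq count height d hd2]

-- ===== VERDICT (by name: the statement is the Claim_ definition above) =====
theorem calc_height_partition_spec : Claim_unchanged_calc_height_partition := by
  intro counts height hDom
  unfold Spec_calc_height_partition
  intro hnD
  exact pv_main counts height hDom hnD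

theorem calc_height_partition_changed : Claim_changed_calc_height_partition := by
  unfold Claim_changed_calc_height_partition; decide

theorem calc_height_partition_tight : Claim_exact_calc_height_partition := by
  intro counts height hDom hD
  obtain ⟨hc, hh⟩ := hD
  subst hc
  unfold calc_height_partition calc_height_partition_alt
  have h1 : ¬ ((2:Int) = 1 ∨ (2:Int) = 0) := by norm_num
  have h2 : ¬ ((2:Int) = 0 ∨ (2:Int) = 1) := by norm_num
  rw [if_neg h1, if_neg h2]
  have hh0 : height ≠ 0 := by omega
  rw [if_neg hh0, if_neg hh0]
  have hcmin : min (2:Int) height = 2 := by omega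
  simp only [hcmin]
  have hrange : PySem.List.pyRange 2 (2 + 1) 1 = [2] := by
    rw [show ((2:Int) + 1) = 2 + 1 from rfl]
    exact PySem.List.pyRange_one_singleton 2
  rw [hrange]
  simp only [List.map_cons, List.map_nil, List.foldl_cons, List.foldl_nil]
  have hmax := pv_part_max 2 height 2 (by norm_num)
  have hge := pv_mb2_ge 2 height rfl hh
  simp only [pvSelectA, hmax, pvStepB]
  rw [if_neg hge]
  simp
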